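-- pv_equiv track=rewrite | github.com/GundalaNikhil/DSA | generate_bitwise_testcases.py | bit003_and_skip_multiples
-- ===== SOURCE A (Python) =====
-- def bit003_and_skip_multiples(L: int, R: int, m: int) -> int:
--     """AND of all numbers in [L,R] excluding multiples of m"""
--     and_result = -1
--     found = False
--
--     # Optimization: if range > 2*m, all bits are potentially set/unset
--     if R - L + 1 > 2 * m:
--         return -1
--
--     for num in range(L, min(R + 1, L + 2 * m + 1)):
--         if num % m != 0:
--             if not found:
--                 and_result = num
--                 found = True
--             else:
--                 and_result &= num
--
--     return and_result if found else -1
-- ===== SOURCE B (Python) =====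
-- def _seg_and(a, b):
--     """AND of all integers in [a, b]; -1 (the AND identity) if the segment is empty."""
--     if a > b:
--         return -1
--     if a < 0 <= b:
--         return 0          # the segment contains 0, so the AND is 0
--     shift = 0
--     while a != b:         # common-prefix trick: strip differing low bits
--         a >>= 1
--         b >>= 1
--         shift += 1
--     return a << shift
--
--
-- def bit003_and_skip_multiples(L: int, R: int, m: int) -> int:
--     """AND of all numbers in [L,R] excluding multiples of m"""
--     if R < L or m <= 0 or R - L + 1 > 2 * m:
--         return -1
--     q1 = -(-L // m) * m   # first multiple of m that is >= L
--     q2 = q1 + m           # the only other multiple that can reach R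
--     res = -1
--     res &= _seg_and(L, min(q1 - 1, R))
--     res &= _seg_and(q1 + 1, min(q2 - 1, R))
--     res &= _seg_and(q2 + 1, R)
--     return res
-- ===== Notes on version B (the rewrite author's own statement) =====
-- stated objective: faster
-- what changed: Instead of AND-ing the up to 2*m+1 numbers of [L,R] one by one while skipping multiples of m, B locates the at most two multiples of m in the range arithmetically and ANDs the up to three remaining contiguous segments, each computed in O(log max) by the common-prefix (shift-until-equal) range-AND trick.
import Mathlib
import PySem

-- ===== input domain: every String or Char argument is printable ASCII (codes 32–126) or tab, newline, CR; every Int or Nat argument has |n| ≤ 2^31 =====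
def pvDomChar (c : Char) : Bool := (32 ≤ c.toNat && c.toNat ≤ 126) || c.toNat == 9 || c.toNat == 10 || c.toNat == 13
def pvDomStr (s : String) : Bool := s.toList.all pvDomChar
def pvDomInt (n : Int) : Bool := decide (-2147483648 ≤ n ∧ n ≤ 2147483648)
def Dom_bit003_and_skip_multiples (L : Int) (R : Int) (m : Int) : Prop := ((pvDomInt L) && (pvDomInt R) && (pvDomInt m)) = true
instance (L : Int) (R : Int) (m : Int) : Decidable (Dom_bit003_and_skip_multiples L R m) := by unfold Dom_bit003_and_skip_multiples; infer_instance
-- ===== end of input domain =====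

-- B replaces A's element-by-element AND loop (up to 2*m+1 iterations) by three interval-ANDs
-- around the at most two multiples of m in [L,R], each computed by the common-prefix bit trick.

-- ===== PORT A =====
-- Python's `return and_result if found else -1`
def pvAFinish (st : Int × Bool) : Int := if st.2 then st.1 else -1

def bit003_and_skip_multiples (L : Int) (R : Int) (m : Int) : Int :=
  if R - L + 1 > 2 * m then -1
  else
    pvAFinish ((PySem.List.pyRange L (min (R + 1) (L + 2 * m + 1)) 1).foldl
      (fun (st : Int × Bool) num =>
        if PySem.Int.mod num m ≠ 0 then
          if st.2 = false then (num, true) else (PySem.Int.band st.1 num, true)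
        else st)
      (-1, false))

-- ===== PORT B =====
-- two facts the loop's termination measure needs (cited in `decreasing_by`)
theorem pv_sr1 (x : Int) : x >>> (1 : Nat) = x.div2 := by
  cases x with
  | ofNat n =>
    show Int.ofNat (n >>> 1) = _
    simp [Int.div2, Nat.shiftRight_one, Nat.div2_val]
  | negSucc n =>
    rw [Int.negSucc_shiftRight]
    simp [Int.div2, Nat.shiftRight_one, Nat.div2_val]

theorem pv_div2_bounds (x : Int) : 2 * x.div2 ≤ x ∧ x ≤ 2 * x.div2 + 1 := by
  have h := Int.bodd_add_div2 x
  cases hb : x.bodd <;> rw [hb] at h <;> simp at h <;> omega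

-- the `while a != b` loop of Source B's _seg_and, with its shift accumulator; the
-- `b < a ∨ (a < 0 ∧ 0 ≤ b)` test only makes the recursion total — pvSegAnd
-- never calls the loop on such inputs, so no reachable value changes
def pvSegLoop (a : Int) (b : Int) (shift : Nat) : Int :=
  if a = b then a <<< shift
  else if b < a ∨ (a < 0 ∧ 0 ≤ b) then 0
  else pvSegLoop (a >>> (1 : Nat)) (b >>> (1 : Nat)) (shift + 1)
termination_by b.toNat + (-a).toNat
decreasing_by
  rw [pv_sr1, pv_sr1]
  have ha := pv_div2_bounds a
  have hb := pv_div2_bounds b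
  omega

-- _seg_and of Source B: AND of all integers in [a,b], -1 if empty
def pvSegAnd (a : Int) (b : Int) : Int :=
  if a > b then -1
  else if a < 0 ∧ 0 ≤ b then 0
  else pvSegLoop a b 0

def bit003_and_skip_multiples_alt (L : Int) (R : Int) (m : Int) : Int :=
  if R < L ∨ m ≤ 0 ∨ R - L + 1 > 2 * m then -1
  else
    let q1 := -(PySem.Int.floordiv (-L) m) * m
    let q2 := q1 + m
    let res1 := PySem.Int.band (-1) (pvSegAnd L (min (q1 - 1) R))
    let res2 := PySem.Int.band res1 (pvSegAnd (q1 + 1) (min (q2 - 1) R))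
    PySem.Int.band res2 (pvSegAnd (q2 + 1) R)

-- ===== PRECONDITION & SPEC =====
def Spec_bit003_and_skip_multiples (L : Int) (R : Int) (m : Int) (out : Int) : Prop := out = bit003_and_skip_multiples_alt L R m
instance (L : Int) (R : Int) (m : Int) (out : Int) : Decidable (Spec_bit003_and_skip_multiples L R m out) := by unfold Spec_bit003_and_skip_multiples; infer_instance

-- ===== CLAIM (what is proved, stated in full; the proofs are below) =====
def Claim_equal_bit003_and_skip_multiples : Prop := ∀ (L : Int) (R : Int) (m : Int), Dom_bit003_and_skip_multiples L R m → Spec_bit003_and_skip_multiples L R m (bit003_and_skip_multiples L R m)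

-- ===== LEMMAS AND PROOFS =====


theorem pv_ldiff_add_and (m n : Nat) : m.ldiff n + (m &&& n) = m := by
  induction m using Nat.binaryRec generalizing n with
  | zero => simp [Nat.ldiff, Nat.bitwise_zero_left]
  | bit b m' ih =>
    rw [show n = Nat.bit n.bodd n.div2 from (Nat.bit_bodd_div2 n).symm]
    rw [Nat.ldiff_bit, Nat.land_bit]
    simp only [Nat.bit_val]
    have h := ih n.div2
    cases b <;> cases n.bodd <;> simp <;> omega

theorem pv_band_eq_land (a b : Int) : PySem.Int.band a b = Int.land a b := by
  have hldiff : ∀ p q : Nat, p - (p &&& q) = p.ldiff q := by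
    intro p q; have := pv_ldiff_add_and p q; omega
  cases a with
  | ofNat p =>
    cases b with
    | ofNat q =>
      show PySem.Int.band (p : Int) (q : Int) = Int.ofNat (p &&& q)
      simp [PySem.Int.band]
    | negSucc q =>
      show PySem.Int.band (p : Int) (Int.negSucc q) = Int.ofNat (Nat.ldiff p q)
      have h1 : ¬ (0 : Int) ≤ Int.negSucc q := by
        have := Int.negSucc_lt_zero q; omega
      have h2 : (-(Int.negSucc q) - 1) = (q : Int) := by
        rw [Int.negSucc_eq]; ring
      simp [PySem.Int.band, h1, hldiff]
  | negSucc p =>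
    have h1 : ¬ (0 : Int) ≤ Int.negSucc p := by
      have := Int.negSucc_lt_zero p; omega
    have h2 : (-(Int.negSucc p) - 1) = (p : Int) := by
      rw [Int.negSucc_eq]; ring
    cases b with
    | ofNat q =>
      show PySem.Int.band (Int.negSucc p) (q : Int) = Int.ofNat (Nat.ldiff q p)
      simp [PySem.Int.band, h1, hldiff]
    | negSucc q =>
      show PySem.Int.band (Int.negSucc p) (Int.negSucc q) = Int.negSucc (p ||| q)
      have h3 : ¬ (0 : Int) ≤ Int.negSucc q := by
        have := Int.negSucc_lt_zero q; omega
      have hp : ¬((p:Int) ≤ -1) := by omega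
      have hq : ¬((q:Int) ≤ -1) := by omega
      simp [PySem.Int.band, Int.negSucc_eq, hp, hq]
      omega

theorem pv_lt_pow_max (p q : Nat) : p < 2 ^ (max p q + 1) :=
  lt_of_le_of_lt (le_max_left p q)
    (lt_of_lt_of_le Nat.lt_two_pow_self (Nat.pow_le_pow_right (by norm_num) (Nat.le_succ _)))

theorem pv_int_ext {x y : Int} (h : ∀ k, x.testBit k = y.testBit k) : x = y := by
  cases x with
  | ofNat p =>
    cases y with
    | ofNat q =>
      have : p = q := by
        apply Nat.eq_of_testBit_eq
        intro i
        simpa [Int.testBit] using h i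
      rw [this]
    | negSucc q =>
      exfalso
      have hk := h (max p q + 1)
      have hp : p.testBit (max p q + 1) = false :=
        Nat.testBit_lt_two_pow (pv_lt_pow_max p q)
      have hq : q.testBit (max p q + 1) = false :=
        Nat.testBit_lt_two_pow (by rw [Nat.max_comm]; exact pv_lt_pow_max q p)
      simp [Int.testBit, hp, hq] at hk
  | negSucc p =>
    cases y with
    | ofNat q =>
      exfalso
      have hk := h (max p q + 1)
      have hp : p.testBit (max p q + 1) = false :=
        Nat.testBit_lt_two_pow (pv_lt_pow_max p q)
      have hq : q.testBit (max p q + 1) = false :=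
        Nat.testBit_lt_two_pow (by rw [Nat.max_comm]; exact pv_lt_pow_max q p)
      simp [Int.testBit, hp, hq] at hk
    | negSucc q =>
      have : p = q := by
        apply Nat.eq_of_testBit_eq
        intro i
        have := h i
        simpa [Int.testBit] using this
      rw [this]

theorem pv_testBit_band (a b : Int) (k : Nat) :
    (PySem.Int.band a b).testBit k = (a.testBit k && b.testBit k) := by
  rw [pv_band_eq_land]; exact Int.testBit_land a b k

theorem pv_int_testBit_neg_one (k : Nat) : (-1 : Int).testBit k = true := by
  show (Int.negSucc 0).testBit k = true
  simp [Int.testBit]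

theorem pv_int_testBit_zero (k : Nat) : (0 : Int).testBit k = false := by
  show (Int.ofNat 0).testBit k = false
  simp [Int.testBit]

theorem pv_testBit_foldl (l : List Int) (x : Int) (k : Nat) :
    (l.foldl PySem.Int.band x).testBit k = (x.testBit k && l.all (fun i => i.testBit k)) := by
  induction l generalizing x with
  | nil => simp
  | cons y ys ih => simp [List.foldl_cons, ih, pv_testBit_band, Bool.and_assoc]

def pvIAnd (a b : Int) : Int := (PySem.List.pyRange a (b + 1) 1).foldl PySem.Int.band (-1)

theorem pv_testBit_iAnd (a b : Int) (k : Nat) :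
    (pvIAnd a b).testBit k = (PySem.List.pyRange a (b + 1) 1).all (fun i => i.testBit k) := by
  rw [pvIAnd, pv_testBit_foldl, pv_int_testBit_neg_one, Bool.true_and]

theorem pv_testBit_succ_int (i : Int) (k : Nat) : i.testBit (k + 1) = i.div2.testBit k := by
  have h := Int.testBit_bit_succ k i.bodd i.div2
  rw [Int.bit_decomp] at h
  exact h

theorem pv_testBit_zero_bodd (i : Int) : i.testBit 0 = i.bodd := by
  have h := Int.testBit_bit_zero i.bodd i.div2
  rw [Int.bit_decomp] at h
  exact h

theorem pv_testBit_two_mul_zero (x : Int) : (2 * x).testBit 0 = false := by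
  have h := Int.testBit_bit_zero false x
  simpa [Int.bit] using h

theorem pv_testBit_two_mul_succ (x : Int) (k : Nat) : (2 * x).testBit (k + 1) = x.testBit k := by
  have h := Int.testBit_bit_succ k false x
  simpa [Int.bit] using h

theorem pv_div2_eq (x d : Int) (h1 : 2 * d ≤ x) (h2 : x ≤ 2 * d + 1) : x.div2 = d := by
  have h := pv_div2_bounds x
  omega

theorem pv_iAnd_halve (a b : Int) (hab : a < b) :
    pvIAnd a b = 2 * pvIAnd a.div2 b.div2 := by
  apply pv_int_ext
  intro k
  cases k with
  | zero =>
    rw [pv_testBit_two_mul_zero, pv_testBit_iAnd]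
    apply List.all_eq_false.mpr
    cases hb : a.bodd with
    | false =>
      refine ⟨a, PySem.List.mem_pyRange_one.mpr (by omega), ?_⟩
      simp [pv_testBit_zero_bodd, hb]
    | true =>
      refine ⟨a + 1, PySem.List.mem_pyRange_one.mpr (by omega), ?_⟩
      simp [pv_testBit_zero_bodd, hb]
  | succ k =>
    rw [pv_testBit_two_mul_succ, pv_testBit_iAnd, pv_testBit_iAnd]
    rw [Bool.eq_iff_iff]
    simp only [List.all_eq_true, PySem.List.mem_pyRange_one]
    have hda := pv_div2_bounds a
    have hdb := pv_div2_bounds b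
    constructor
    · intro H j hj
      by_cases hc : a ≤ 2 * j
      · have h2 := H (2 * j) (by omega)
        rw [pv_testBit_succ_int, pv_div2_eq (2 * j) j (by omega) (by omega)] at h2
        exact h2
      · have hj2 : a.div2 = j := by omega
        have h2 := H a (by omega)
        rw [pv_testBit_succ_int, hj2] at h2
        exact h2
    · intro H i hi
      rw [pv_testBit_succ_int]
      have hdi := pv_div2_bounds i
      exact H i.div2 (by omega)

theorem pv_iAnd_self (a : Int) : pvIAnd a a = a := by
  rw [pvIAnd, PySem.List.pyRange_one_cons (by omega), PySem.List.pyRange_one_eq_nil (by omega)]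
  show PySem.Int.band (-1) a = a
  rw [PySem.Int.band_comm, PySem.Int.band_neg_one]

theorem pv_segLoop_eq (n : Nat) : ∀ a b : Int, (b.toNat + (-a).toNat) = n → a ≤ b → (0 ≤ a ∨ b < 0) →
    ∀ s : Nat, pvSegLoop a b s = pvIAnd a b * 2 ^ s := by
  induction n using Nat.strong_induction_on with
  | _ n ih =>
    intro a b hn hab hsgn s
    rw [pvSegLoop]
    by_cases he : a = b
    · subst he
      rw [if_pos rfl, pv_iAnd_self, Int.shiftLeft_eq]
    · have hlt : a < b := lt_of_le_of_ne hab he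
      have hg : ¬ (b < a ∨ (a < 0 ∧ 0 ≤ b)) := by omega
      rw [if_neg he, if_neg hg, pv_sr1, pv_sr1]
      have hda := pv_div2_bounds a
      have hdb := pv_div2_bounds b
      rw [ih (b.div2.toNat + (-a.div2).toNat) (by omega) a.div2 b.div2 rfl (by omega) (by omega) (s + 1),
        pv_iAnd_halve a b hlt]
      ring

theorem pv_segAnd_eq (a b : Int) : pvSegAnd a b = pvIAnd a b := by
  rw [pvSegAnd]
  by_cases h1 : a > b
  · rw [if_pos h1, pvIAnd, PySem.List.pyRange_one_eq_nil (by omega)]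
    rfl
  · rw [if_neg h1]
    by_cases h2 : a < 0 ∧ 0 ≤ b
    · rw [if_pos h2]
      apply pv_int_ext; intro k
      rw [pv_int_testBit_zero, pv_testBit_iAnd]
      symm
      apply List.all_eq_false.mpr
      exact ⟨0, PySem.List.mem_pyRange_one.mpr (by omega), by simp [pv_int_testBit_zero]⟩
    · rw [if_neg h2]
      have h := pv_segLoop_eq (b.toNat + (-a).toNat) a b rfl (by omega) (by omega) 0
      simpa using h

theorem pv_fold_pair_true (l : List Int) (x : Int) :
    l.foldl (fun (st : Int × Bool) num =>
        if st.2 = false then (num, true) else (PySem.Int.band st.1 num, true)) (x, true)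
      = (l.foldl PySem.Int.band x, true) := by
  induction l generalizing x with
  | nil => rfl
  | cons y ys ih => simp [List.foldl_cons, ih]

theorem pv_fold_pairA (l : List Int) :
    pvAFinish (l.foldl (fun (st : Int × Bool) num =>
        if st.2 = false then (num, true) else (PySem.Int.band st.1 num, true)) (-1, false))
      = l.foldl PySem.Int.band (-1) := by
  cases l with
  | nil => rfl
  | cons y ys =>
    have hb : PySem.Int.band (-1) y = y := by
      rw [PySem.Int.band_comm, PySem.Int.band_neg_one]
    simp [List.foldl_cons, pv_fold_pair_true, hb, pvAFinish]

theorem pv_mul_lt (m x y : Int) (hm : 0 < m) : m * x < m * y ↔ x < y :=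
  ⟨fun h => Int.lt_of_mul_lt_mul_left h (le_of_lt hm),
   fun h => Int.mul_lt_mul_of_pos_left h hm⟩

theorem pv_partition (L R m : Int) (hm : 1 ≤ m) (_hLR : L ≤ R) (hspan : R - L + 1 ≤ 2 * m)
    (c : Int) (hc1 : (c - 1) * m < L) (hc2 : L ≤ c * m)
    (P : Int → Prop) :
    ((∀ i, L ≤ i → i < R + 1 → ¬ m ∣ i → P i) ↔
      ((∀ i, L ≤ i → i < min (c * m - 1) R + 1 → P i) ∧
       (∀ i, c * m + 1 ≤ i → i < min (c * m + m - 1) R + 1 → P i) ∧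
       (∀ i, c * m + m + 1 ≤ i → i < R + 1 → P i))) := by
  have e0 : (c - 1) * m = c * m - m := by ring
  have e1 : m * (c - 1) = c * m - m := by ring
  have e2 : m * c = c * m := by ring
  have e3 : m * (c + 1) = c * m + m := by ring
  have e4 : m * (c + 2) = c * m + 2 * m := by ring
  constructor
  · intro H
    refine ⟨?_, ?_, ?_⟩ <;> intro i h1 h2 <;>
      apply H i (by omega) (by omega) <;> rintro ⟨t, ht⟩
    · have f1 := (pv_mul_lt m (c - 1) t (by omega)).mp (by omega)
      have f2 := (pv_mul_lt m t c (by omega)).mp (by omega)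
      omega
    · have f1 := (pv_mul_lt m c t (by omega)).mp (by omega)
      have f2 := (pv_mul_lt m t (c + 1) (by omega)).mp (by omega)
      omega
    · have f1 := (pv_mul_lt m (c + 1) t (by omega)).mp (by omega)
      have f2 := (pv_mul_lt m t (c + 2) (by omega)).mp (by omega)
      omega
  · rintro ⟨H1, H2, H3⟩ i h1 h2 hnd
    by_cases hq1 : i ≤ c * m - 1
    · exact H1 i (by omega) (by omega)
    · by_cases he1 : i = c * m
      · exact absurd ⟨c, by rw [he1]; ring⟩ hnd
      · by_cases hq2 : i ≤ c * m + m - 1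
        · exact H2 i (by omega) (by omega)
        · by_cases he2 : i = c * m + m
          · exact absurd ⟨c + 1, by rw [he2]; ring⟩ hnd
          · exact H3 i (by omega) (by omega)

theorem pv_main (L R m : Int) : bit003_and_skip_multiples L R m = bit003_and_skip_multiples_alt L R m := by
  unfold bit003_and_skip_multiples bit003_and_skip_multiples_alt
  by_cases hg : R - L + 1 > 2 * m
  · rw [if_pos hg, if_pos (by omega : R < L ∨ m ≤ 0 ∨ R - L + 1 > 2 * m)]
  · rw [if_neg hg]
    by_cases hRL : R < L
    · rw [if_pos (by omega : R < L ∨ m ≤ 0 ∨ R - L + 1 > 2 * m),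
        PySem.List.pyRange_one_eq_nil (by omega : min (R + 1) (L + 2 * m + 1) ≤ L)]
      rfl
    · have hm : 1 ≤ m := by omega
      rw [if_neg (by omega : ¬(R < L ∨ m ≤ 0 ∨ R - L + 1 > 2 * m))]
      have hmin : min (R + 1) (L + 2 * m + 1) = R + 1 := by omega
      rw [hmin]
      set c : Int := -(PySem.Int.floordiv (-L) m) with hc
      obtain ⟨hc1, hc2⟩ :=
        (PySem.Int.neg_floordiv_neg_eq_iff_of_pos (a := L) (b := m) (q := c)
          (by omega)).mp hc.symm
      simp only [pv_segAnd_eq]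
      rw [PySem.List.foldl_ite_eq_foldl_filter
        (fun num => PySem.Int.mod num m ≠ 0)
        (fun (st : Int × Bool) num =>
          if st.2 = false then (num, true) else (PySem.Int.band st.1 num, true))]
      rw [pv_fold_pairA]
      apply pv_int_ext; intro k
      rw [pv_testBit_foldl, pv_testBit_band, pv_testBit_band, pv_testBit_band,
        pv_int_testBit_neg_one, pv_testBit_iAnd, pv_testBit_iAnd, pv_testBit_iAnd]
      rw [Bool.eq_iff_iff]
      simp only [Bool.true_and, Bool.and_eq_true, List.all_eq_true, List.mem_filter,
        PySem.List.mem_pyRange_one, decide_eq_true_eq, and_imp]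
      have hpart := pv_partition L R m hm (by omega) (by omega) c hc1 hc2
        (fun i => i.testBit k = true)
      constructor
      · intro H
        have h := hpart.mp (fun j hj1 hj2 hnd =>
          H j hj1 hj2 (fun hz => hnd ((PySem.Int.mod_eq_zero_iff_dvd j m).mp hz)))
        tauto
      · intro H i h1 h2 hmod
        exact hpart.mpr (by tauto) i h1 h2
          (fun hd => hmod ((PySem.Int.mod_eq_zero_iff_dvd i m).mpr hd))

-- ===== VERDICT (by name: the statement is the Claim_ definition above) =====
theorem bit003_and_skip_multiples_spec : Claim_equal_bit003_and_skip_multiples := by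
  intro L R m _hdom
  show bit003_and_skip_multiples L R m = bit003_and_skip_multiples_alt L R m
  exact pv_main L R m
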